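-- pv_equiv track=rewrite | github.com/WanYi05/ccClub-Judge | 進位/二十六進位.py | func
-- ===== SOURCE A (Python) =====
-- def func(n):
--     remainders = []
--     quotients = []
--
--     while n >= 26:
--         remainder = n % 26
--         quotient = n // 26
--         remainders.append(remainder)
--         quotients.append(quotient)
--         n //= 26
--
--     if quotients:
--         result = [n] + remainders[::-1]
--     else:
--         result = [n]
--     return result
-- ===== SOURCE B (Python) =====
-- def func(n):
--     if n < 26:
--         return [n]
--     return func(n // 26) + [n % 26]
-- ===== Notes on version B (the rewrite author's own statement) =====
-- stated objective: simpler
-- what changed: Replaces A's while-loop with its remainders/quotients accumulator lists and final reversal by a three-line recursion on the quotient that appends the current remainder.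
import Mathlib
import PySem

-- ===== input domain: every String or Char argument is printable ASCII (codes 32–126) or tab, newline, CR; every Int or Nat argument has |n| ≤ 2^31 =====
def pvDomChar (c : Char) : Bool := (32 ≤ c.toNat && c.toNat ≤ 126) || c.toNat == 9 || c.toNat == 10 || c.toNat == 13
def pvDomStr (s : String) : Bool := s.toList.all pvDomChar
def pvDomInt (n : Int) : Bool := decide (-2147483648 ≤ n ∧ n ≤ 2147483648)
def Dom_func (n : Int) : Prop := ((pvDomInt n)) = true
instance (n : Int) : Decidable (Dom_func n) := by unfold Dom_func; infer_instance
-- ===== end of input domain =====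

-- B replaces A's while-loop with accumulator lists by a three-line recursion on n // 26 (simpler, same cost).

-- ===== PORT A =====
-- A's while loop, state (n, remainders, quotients); fuel (n.toNat + 1 at the call) is only a totality guard
-- (the loop variable's toNat strictly decreases, see funcLoop_fuel_irrel-style lemmas below); remainders[::-1] is
-- List.reverse (exact for a full [::-1] slice).
def funcLoop : Nat → Int → List Int → List Int → Int × List Int × List Int
  | 0, n, rs, qs => (n, rs, qs)
  | fuel + 1, n, rs, qs =>
    if n ≥ 26 then
      funcLoop fuel (PySem.Int.floordiv n 26)
        (rs ++ [PySem.Int.mod n 26])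
        (qs ++ [PySem.Int.floordiv n 26])
    else (n, rs, qs)

def func (n : Int) : List Int :=
  let s := funcLoop (n.toNat + 1) n [] []
  if s.2.2 ≠ [] then [s.1] ++ s.2.1.reverse else [s.1]

-- ===== PORT B =====
-- B's recursion; fuel (n.toNat + 1 at the call) is only a totality guard, the 0 case is never reached.
def funcAltGo : Nat → Int → List Int
  | 0, n => [n]
  | fuel + 1, n =>
    if n < 26 then [n]
    else funcAltGo fuel (PySem.Int.floordiv n 26) ++ [PySem.Int.mod n 26]

def func_alt (n : Int) : List Int := funcAltGo (n.toNat + 1) n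

-- ===== PRECONDITION & SPEC =====
def Spec_func (n : Int) (out : List Int) : Prop := out = func_alt n
instance (n : Int) (out : List Int) : Decidable (Spec_func n out) := by unfold Spec_func; infer_instance

-- ===== CLAIM (what is proved, stated in full; the proofs are below) =====
def Claim_equal_func : Prop := ∀ (n : Int), Dom_func n → Spec_func n (func n)

-- ===== LEMMAS AND PROOFS =====

theorem floordiv26_toNat_lt (n : Int) (h : n ≥ 26) :
    (PySem.Int.floordiv n 26).toNat < n.toNat := by
  rw [PySem.Int.floordiv_eq_ediv_of_pos (by omega)]
  omega

-- funcAltGo does not depend on the fuel once the fuel exceeds the measure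
theorem funcAltGo_fuel_irrel (f : Nat) : ∀ (g : Nat) (n : Int), n.toNat < f → n.toNat < g →
    funcAltGo f n = funcAltGo g n := by
  induction f with
  | zero => intro g n hf _; omega
  | succ f ih =>
    intro g n _ hg
    match g with
    | 0 => omega
    | g + 1 =>
      by_cases h : n < 26
      · simp [funcAltGo, h]
      · have hlt := floordiv26_toNat_lt n (by omega)
        simp only [funcAltGo, if_neg h]
        rw [ih g (PySem.Int.floordiv n 26) (by omega) (by omega)]

-- loop invariant: head-plus-reversed-remainders of the loop result is B's digits followed by the reversed accumulator
theorem funcLoop_invariant (f : Nat) : ∀ (n : Int) (rs qs : List Int), n.toNat < f →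
    [(funcLoop f n rs qs).1] ++ (funcLoop f n rs qs).2.1.reverse = funcAltGo f n ++ rs.reverse := by
  induction f with
  | zero => intro n rs qs hf; omega
  | succ f ih =>
    intro n rs qs hf
    by_cases h : n ≥ 26
    · have hlt := floordiv26_toNat_lt n h
      simp only [funcLoop, funcAltGo, if_pos h, if_neg (show ¬ n < 26 by omega)]
      rw [ih (PySem.Int.floordiv n 26) (rs ++ [PySem.Int.mod n 26]) _ (by omega)]
      rw [funcAltGo_fuel_irrel f (f + 1) (PySem.Int.floordiv n 26) (by omega) (by omega)]
      simp
    · simp [funcLoop, funcAltGo, if_neg h, if_pos (show n < 26 by omega)]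

-- the loop never shrinks the quotients accumulator
theorem funcLoop_quotients_prefix (f : Nat) : ∀ (n : Int) (rs qs : List Int),
    ∃ t, (funcLoop f n rs qs).2.2 = qs ++ t := by
  induction f with
  | zero => intro n rs qs; exact ⟨[], by simp [funcLoop]⟩
  | succ f ih =>
    intro n rs qs
    by_cases h : n ≥ 26
    · simp only [funcLoop, if_pos h]
      obtain ⟨t, ht⟩ := ih (PySem.Int.floordiv n 26)
        (rs ++ [PySem.Int.mod n 26]) (qs ++ [PySem.Int.floordiv n 26])
      exact ⟨PySem.Int.floordiv n 26 :: t, by rw [ht]; simp⟩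
    · exact ⟨[], by simp [funcLoop, if_neg h]⟩

-- ===== VERDICT (by name: the statement is the Claim_ definition above) =====
theorem func_spec : Claim_equal_func := by
  intro n _
  unfold Spec_func func func_alt
  have hinv := funcLoop_invariant (n.toNat + 1) n [] [] (by omega)
  simp only [List.reverse_nil, List.append_nil] at hinv
  by_cases h : n ≥ 26
  · have hq : (funcLoop (n.toNat + 1) n [] []).2.2 ≠ [] := by
      simp only [funcLoop, if_pos h]
      obtain ⟨t, ht⟩ := funcLoop_quotients_prefix n.toNat (PySem.Int.floordiv n 26)
        ([] ++ [PySem.Int.mod n 26]) ([] ++ [PySem.Int.floordiv n 26])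
      rw [ht]; simp
    simpa [hq] using hinv
  · have heq : funcLoop (n.toNat + 1) n [] [] = (n, [], []) := by
      simp [funcLoop, if_neg h]
    rw [heq]
    simp [funcAltGo, if_pos (show n < 26 by omega)]
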